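-- pv_equiv track=rewrite | github.com/patrickmziet/lf | backend/learnfast/core/utils.py | get_rec_cards
-- ===== SOURCE A (Python) =====
-- PAGE_TO_CARDS = {
--     (1, 2): 15,
--     (2, 5): 30,
--     (5, 10): 50,
--     (10, 15): 65,
--     (15, 30): 75,
--     (30, 40): 90,
--     (40, 50): 100
-- }
--
-- def get_rec_cards(num_pages):
--     # Make sure num_pages > 1 and throw error if not
--     if num_pages < 1:
--         return "Pages must be at least 1."
--
--     if num_pages >= 50:
--         return max(100, num_pages)
--
--     for page_range, cards in PAGE_TO_CARDS.items():
--         if page_range[0] <= num_pages < page_range[1]: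
--             return cards
--     return "Invalid number of pages"  # In case the number is below 1
-- ===== SOURCE B (Python) =====
-- BOUNDS = [2, 5, 10, 15, 30, 40]
-- VALUES = [15, 30, 50, 65, 75, 90, 100]
--
-- def get_rec_cards(num_pages):
--     if num_pages < 1:
--         return "Pages must be at least 1."
--     if num_pages >= 50:
--         return max(100, num_pages)
--     idx = sum(1 for b in BOUNDS if b <= num_pages)
--     return VALUES[idx]
-- ===== Notes on version B (the rewrite author's own statement) =====
-- stated objective: idiomatic
-- what changed: Replaces the linear scan over a dict of (lo,hi) range keys with a bisect-style lookup: count thresholds <= num_pages in a sorted bounds array and index a parallel values array.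
-- outside the precondition, e.g. on get_rec_cards(0): A returns 'Pages must be at least 1.', B returns 'Pages must be at least 1.'
import Mathlib
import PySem

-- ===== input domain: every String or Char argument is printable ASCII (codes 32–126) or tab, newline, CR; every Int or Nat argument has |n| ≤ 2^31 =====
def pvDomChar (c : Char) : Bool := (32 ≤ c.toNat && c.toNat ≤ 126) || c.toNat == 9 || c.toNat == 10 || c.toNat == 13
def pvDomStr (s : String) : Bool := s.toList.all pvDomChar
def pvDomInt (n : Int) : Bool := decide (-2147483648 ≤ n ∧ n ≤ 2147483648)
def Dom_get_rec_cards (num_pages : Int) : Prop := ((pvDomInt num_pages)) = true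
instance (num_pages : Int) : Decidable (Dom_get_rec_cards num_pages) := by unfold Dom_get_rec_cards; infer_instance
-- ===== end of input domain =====

-- B replaces A's scan over a dict of (lo,hi) range keys with a sorted-thresholds
-- bisect-style lookup into a parallel values array (idiomatic; same cost).


-- ===== PORT A =====
def pageToCards : List ((Int × Int) × Int) :=
  [((1, 2), 15), ((2, 5), 30), ((5, 10), 50), ((10, 15), 65),
   ((15, 30), 75), ((30, 40), 90), ((40, 50), 100)]

-- the for-loop with early return; `none` = falling through to the "Invalid" string return
def lookupCards : List ((Int × Int) × Int) → Int → Option Int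
  | [], _ => none
  | (r, c) :: rest, n => if r.1 ≤ n ∧ n < r.2 then some c else lookupCards rest n

def get_rec_cards (num_pages : Int) : Int :=
  if num_pages < 1 then 0  -- Python returns a string here; excluded by Pre_
  else if num_pages ≥ 50 then max 100 num_pages
  else (lookupCards pageToCards num_pages).getD 0  -- `none` is Python's string branch; unreachable inside Pre_

-- ===== PORT B =====
def cardBounds : List Int := [2, 5, 10, 15, 30, 40]
def cardValues : List Int := [15, 30, 50, 65, 75, 90, 100]

def get_rec_cards_alt (num_pages : Int) : Int :=
  if num_pages < 1 then 0  -- B returns the same string here; excluded by Pre_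
  else if num_pages ≥ 50 then max 100 num_pages
  else
    let idx := (cardBounds.filter (fun b => decide (b ≤ num_pages))).length
    (PySem.List.pyGet? cardValues (idx : Int)).getD 0  -- VALUES[idx], always in range

-- ===== PRECONDITION & SPEC =====
-- Pre_ excludes num_pages < 1, where A returns the string "Pages must be at least 1." (not an Int).
def Pre_get_rec_cards (num_pages : Int) : Prop := 1 ≤ num_pages
instance (num_pages : Int) : Decidable (Pre_get_rec_cards num_pages) := by unfold Pre_get_rec_cards; infer_instance
def pvWitness_get_rec_cards : Int := 7
def Spec_get_rec_cards (num_pages : Int) (out : Int) : Prop := out = get_rec_cards_alt num_pages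
instance (num_pages : Int) (out : Int) : Decidable (Spec_get_rec_cards num_pages out) := by unfold Spec_get_rec_cards; infer_instance

-- ===== CLAIM (what is proved, stated in full; the proofs are below) =====
def Claim_equal_get_rec_cards : Prop := ∀ (num_pages : Int), Dom_get_rec_cards num_pages → Pre_get_rec_cards num_pages → Spec_get_rec_cards num_pages (get_rec_cards num_pages)

-- ===== LEMMAS AND PROOFS =====

-- ===== VERDICT (by name: the statement is the Claim_ definition above) =====
theorem get_rec_cards_spec : Claim_equal_get_rec_cards := by
  intro n _ hp
  unfold Spec_get_rec_cards
  by_cases h50 : 50 ≤ n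
  · simp [get_rec_cards, get_rec_cards_alt, h50]
  · have h1 : 1 ≤ n := hp
    have h2 : n < 50 := by omega
    interval_cases n <;> decide
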